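-- pv_equiv track=rewrite | github.com/bergercookie/vim-notes2wiki | convert_notes.py | sed_snippets
-- ===== SOURCE A (Python) =====
-- def sed_snippets(lines: list) -> str:
--     """Convert vim-notes code snippets to vimwiki."""
--
--     lines_out = lines
--
--     # find lines that contain ```
--     # group them by two, act only on the first ones
--     snippet_idxs = [li for li, l in enumerate(lines_out) if "```" in l]
--     idx_pairs = [(snippet_idxs[i], snippet_idxs[i+1])
--                  for i in range(0, len(snippet_idxs) - 1, 2)]
--
--     for sn_start, sn_end in idx_pairs:
--         lines_out[sn_start] = "{{{" + lines_out[sn_start][3:]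
--         lines_out[sn_end] = "}}}" + "\n"
--
--     return lines_out
-- ===== SOURCE B (Python) =====
-- def sed_snippets(lines: list) -> str:
--     """Convert vim-notes code snippets to vimwiki.
--
--     Single forward pass with a buffer: lines after an unmatched ``` marker
--     are buffered; when the closing marker arrives the buffered snippet is
--     emitted with vimwiki delimiters, otherwise the buffer is flushed verbatim.
--     The input list is updated in place and returned (as in the original).
--     """
--     out = []
--     buf = None  # None = outside a snippet; else [opener, lines since it]
--     for l in lines:
--         if "```" in l:
--             if buf is None:
--                 buf = [l]
--             else:
--                 out.append("{{{" + buf[0][3:])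
--                 out += buf[1:]
--                 out.append("}}}\n")
--                 buf = None
--         else:
--             if buf is None:
--                 out.append(l)
--             else:
--                 buf.append(l)
--     if buf is not None:
--         out += buf
--     lines[:] = out
--     return lines
-- ===== Notes on version B (the rewrite author's own statement) =====
-- stated objective: alternative
-- what changed: Replaces A's three-phase index arithmetic (enumerate all marker indices, pair them up, then patch the list by index) with a single forward state-machine pass that buffers lines after an unmatched marker and emits the rewritten snippet when its closer arrives.
import Mathlib
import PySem

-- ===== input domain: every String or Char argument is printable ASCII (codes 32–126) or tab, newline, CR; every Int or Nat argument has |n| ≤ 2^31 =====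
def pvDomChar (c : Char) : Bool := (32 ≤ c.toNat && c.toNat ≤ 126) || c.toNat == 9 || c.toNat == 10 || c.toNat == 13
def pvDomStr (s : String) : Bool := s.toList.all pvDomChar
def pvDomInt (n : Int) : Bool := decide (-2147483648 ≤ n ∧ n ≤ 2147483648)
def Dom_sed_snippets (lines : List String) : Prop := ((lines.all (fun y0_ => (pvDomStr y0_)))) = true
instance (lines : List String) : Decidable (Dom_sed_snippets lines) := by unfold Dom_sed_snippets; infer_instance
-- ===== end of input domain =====

-- B replaces A's three-phase index bookkeeping (collect marker indices, pair them, patch by index)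
-- with a single forward buffer state machine; equivalence here is about the RETURN value (both
-- Pythons also leave `lines` holding that same content).

-- ===== PORT A =====
-- shared atoms: '"```" in l' and 'l[3:]'
def markerB (l : String) : Bool := PySem.Str.isIn "```" l
def drop3 (s : String) : String := PySem.Str.slice s (some 3) none

def sed_snippets (lines : List String) : List String :=
  let snippet_idxs : List Int :=
    ((PySem.List.enumerate lines).filter (fun p => markerB p.2)).map (fun p => p.1)
  let idx_pairs : List (Int × Int) :=
    (PySem.List.pyRange 0 ((snippet_idxs.length : Int) - 1) 2).map
      (fun i => (PySem.List.pyGetD snippet_idxs i 0, PySem.List.pyGetD snippet_idxs (i + 1) 0))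
  idx_pairs.foldl (fun lines_out p =>
    let lines_out' := PySem.List.pySetD lines_out p.1
        ("{{{" ++ drop3 (PySem.List.pyGetD lines_out p.1 ""))
    PySem.List.pySetD lines_out' p.2 ("}}}" ++ "\n")) lines

-- ===== PORT B =====
-- one step of B's loop: st = (out, buf); buf = none means 'outside a snippet'
def bStep (st : List String × Option (List String)) (l : String) :
    List String × Option (List String) :=
  if markerB l then
    match st.2 with
    | none => (st.1, some [l])
    | some buf => (st.1 ++ ["{{{" ++ drop3 (buf.headD "")] ++ buf.tail ++ ["}}}\n"], none)
  else
    match st.2 with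
    | none => (st.1 ++ [l], none)
    | some buf => (st.1, some (buf ++ [l]))

def sed_snippets_alt (lines : List String) : List String :=
  let r := lines.foldl bStep ([], none)
  match r.2 with
  | none => r.1
  | some buf => r.1 ++ buf

-- ===== PRECONDITION & SPEC =====
def Spec_sed_snippets (lines : List String) (out : List String) : Prop := out = sed_snippets_alt lines
instance (lines : List String) (out : List String) : Decidable (Spec_sed_snippets lines out) := by unfold Spec_sed_snippets; infer_instance

-- ===== CLAIM (what is proved, stated in full; the proofs are below) =====
def Claim_equal_sed_snippets : Prop := ∀ (lines : List String), Dom_sed_snippets lines → Spec_sed_snippets lines (sed_snippets lines)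

-- ===== LEMMAS AND PROOFS =====

-- split a list at its first marker line: (prefix without markers, rest after the marker if any)
def splitM : List String → List String × Option (List String)
  | [] => ([], none)
  | h :: t => if markerB h then ([], some t) else ((h :: (splitM t).1), (splitM t).2)

theorem splitM_shape : ∀ (t mid rest : List String), splitM t = (mid, some rest) →
    ∃ c, t = mid ++ c :: rest := by
  intro t
  induction t with
  | nil => intro mid rest h; simp [splitM] at h
  | cons h t ih =>
    intro mid rest hsp
    by_cases hm : markerB h
    · simp only [splitM, hm, if_pos, Prod.mk.injEq, Option.some.injEq] at hsp
      obtain ⟨rfl, rfl⟩ := hsp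
      exact ⟨h, rfl⟩
    · rw [splitM, if_neg hm] at hsp
      rw [Prod.mk.injEq] at hsp
      obtain ⟨h1, h2⟩ := hsp
      obtain ⟨c, hc⟩ := ih (splitM t).1 rest (by rw [Prod.ext_iff]; exact ⟨rfl, h2⟩)
      exact ⟨c, by rw [← h1, List.cons_append, ← hc]⟩

theorem splitM_none_fst : ∀ (t : List String), (splitM t).2 = none → (splitM t).1 = t
  | [] => by simp [splitM]
  | h :: t => by
    by_cases hm : markerB h <;> simp [splitM, hm]
    exact splitM_none_fst t

theorem splitM_some_len (t mid rest : List String) (h : splitM t = (mid, some rest)) :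
    rest.length < t.length := by
  obtain ⟨c, hc⟩ := splitM_shape t mid rest h
  subst hc; simp; omega

-- the canonical recursive specification both ports are reduced to
def g : List String → List String
  | [] => []
  | h :: t =>
    if markerB h then
      match hsplit : splitM t with
      | (_mid, none) => h :: t
      | (mid, some rest) => ("{{{" ++ drop3 h) :: (mid ++ "}}}\n" :: g rest)
    else h :: g t
termination_by ls => ls.length
decreasing_by
  · exact Nat.lt_succ_of_lt (splitM_some_len t mid rest hsplit)
  · simp

theorem g_cons_nomarker (h : String) (t : List String) (hm : ¬ markerB h = true) :
    g (h :: t) = h :: g t := by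
  conv_lhs => rw [g.eq_def]
  simp [hm]

theorem g_cons_marker_none (h : String) (t : List String) (hm : markerB h = true)
    (hsp : (splitM t).2 = none) : g (h :: t) = h :: t := by
  conv_lhs => rw [g.eq_def]
  simp only [hm, if_pos]
  split
  · rfl
  · rename_i mid' rest' heq
    rw [heq] at hsp; simp at hsp

theorem g_cons_marker_some (h : String) (t mid rest : List String) (hm : markerB h = true)
    (hsp : splitM t = (mid, some rest)) :
    g (h :: t) = ("{{{" ++ drop3 h) :: (mid ++ "}}}\n" :: g rest) := by
  conv_lhs => rw [g.eq_def]
  simp only [hm, if_pos]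
  split
  · rename_i heq
    rw [hsp] at heq; simp at heq
  · rename_i mid' rest' heq
    rw [hsp] at heq
    simp only [Prod.mk.injEq, Option.some.injEq] at heq
    obtain ⟨rfl, rfl⟩ := heq
    rfl

-- ---------- A-side reduction ----------

-- marker indices as naturals
def idxsN : List String → List Nat
  | [] => []
  | h :: t => if markerB h then 0 :: (idxsN t).map (· + 1) else (idxsN t).map (· + 1)

-- pairing (x0,x1),(x2,x3),…
def gPairs : List Nat → List (Nat × Nat)
  | [] => []
  | [_] => []
  | a :: b :: t => (a, b) :: gPairs t

def foldA (ps : List (Nat × Nat)) (ls : List String) : List String :=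
  ps.foldl (fun ls p => (ls.set p.1 ("{{{" ++ drop3 (ls.getD p.1 ""))).set p.2 ("}}}" ++ "\n")) ls

theorem enum_filter (ls : List String) : ∀ (s : Int),
    ((PySem.List.enumerate ls s).filter (fun p => markerB p.2)).map (fun p => p.1)
      = (idxsN ls).map (fun (k : Nat) => s + (k : Int)) := by
  induction ls with
  | nil => intro s; simp [PySem.List.enumerate_nil, idxsN]
  | cons h t ih =>
    intro s
    rw [PySem.List.enumerate_cons]
    by_cases hm : markerB h
    · rw [List.filter_cons_of_pos (by simpa using hm), List.map_cons, ih (s + 1)]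
      simp only [idxsN, hm, if_pos, List.map_cons, List.map_map, Nat.cast_zero, add_zero]
      rw [List.cons_eq_cons]
      refine ⟨by simp, ?_⟩
      apply List.map_congr_left; intro k _
      simp only [Function.comp_apply]; push_cast; ring
    · rw [List.filter_cons_of_neg (by simpa using hm), ih (s + 1)]
      simp only [idxsN, hm, if_neg, Bool.not_eq_true, List.map_map]
      apply List.map_congr_left; intro k _
      simp only [Function.comp_apply]; push_cast; ring

def pairsA (xs : List Int) : List (Int × Int) :=
  (PySem.List.pyRange 0 ((xs.length : Int) - 1) 2).map
    (fun i => (PySem.List.pyGetD xs i 0, PySem.List.pyGetD xs (i + 1) 0))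

theorem pyGetD_cons2 {α : Type} (x y : α) (l : List α) (k : Nat) (d : α) :
    PySem.List.pyGetD (x :: y :: l) ((k : Int) + 2) d = PySem.List.pyGetD l (k : Int) d := by
  have : ((k : Int) + 2) = ((k + 2 : Nat) : Int) := by push_cast; ring
  rw [this, PySem.List.pyGetD_natCast, PySem.List.pyGetD_natCast]
  simp

theorem pairsA_cons_cons (a b : Int) (t : List Int) :
    pairsA (a :: b :: t) = (a, b) :: pairsA t := by
  unfold pairsA
  rw [PySem.List.pyRange_of_pos _ _ (by norm_num), PySem.List.pyRange_of_pos _ _ (by norm_num)]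
  have h1 : (if (0:Int) < (((a :: b :: t).length : Int) - 1) then
      ((((a :: b :: t).length : Int) - 1 - 0 + 2 - 1) / 2).toNat else 0) = t.length / 2 + 1 := by
    simp only [List.length_cons]
    split <;> push_cast <;> omega
  have h2 : (if (0:Int) < ((t.length : Int) - 1) then
      (((t.length : Int) - 1 - 0 + 2 - 1) / 2).toNat else 0) = t.length / 2 := by
    split <;> omega
  rw [h1, h2, List.range_succ_eq_map]
  simp only [List.map_cons, List.map_map]
  rw [List.cons_eq_cons]
  constructor
  · simp [PySem.List.pyGetD]
  · apply List.map_congr_left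
    intro k _
    simp only [Function.comp_apply]
    have e1 : (0 : Int) + 2 * ((k + 1 : Nat) : Int) = ((k + k : Nat) : Int) + 2 := by push_cast; ring
    rw [e1]
    have e2 : ((k + k : Nat) : Int) + 2 + 1 = ((k + k + 1 : Nat) : Int) + 2 := by push_cast; ring
    rw [e2, pyGetD_cons2, pyGetD_cons2]
    congr 1 <;> push_cast <;> ring_nf

theorem pairsA_nil : pairsA [] = [] := by
  simp [pairsA, PySem.List.pyRange_of_pos 0 (-1) (by norm_num : (0:Int) < 2)]

theorem pairsA_singleton (a : Int) : pairsA [a] = [] := by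
  simp [pairsA, PySem.List.pyRange_of_pos 0 0 (by norm_num : (0:Int) < 2)]

theorem pairsA_cast : ∀ (xs : List Nat),
    pairsA (xs.map (fun (k : Nat) => (k : Int)))
      = (gPairs xs).map (fun (p : Nat × Nat) => ((p.1 : Int), (p.2 : Int))) := by
  intro xs
  induction xs using gPairs.induct with
  | case1 => simp [pairsA_nil, gPairs]
  | case2 a => simp [pairsA_singleton, gPairs]
  | case3 a b t ih =>
    rw [List.map_cons, List.map_cons, pairsA_cons_cons, ih]
    rfl

theorem foldl_cast_pairs : ∀ (ps : List (Nat × Nat)) (ls : List String),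
    (ps.map (fun (p : Nat × Nat) => ((p.1 : Int), (p.2 : Int)))).foldl (fun lines_out p =>
      let lines_out' := PySem.List.pySetD lines_out p.1
          ("{{{" ++ drop3 (PySem.List.pyGetD lines_out p.1 ""))
      PySem.List.pySetD lines_out' p.2 ("}}}" ++ "\n")) ls = foldA ps ls := by
  intro ps
  induction ps with
  | nil => intro ls; simp [foldA]
  | cons p ps ih =>
    intro ls
    simp only [List.map_cons, List.foldl_cons, foldA] at *
    rw [ih]
    simp [PySem.List.pySetD_natCast, PySem.List.pyGetD_natCast]

theorem A_eq_foldA (lines : List String) :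
    sed_snippets lines = foldA (gPairs (idxsN lines)) lines := by
  have h1 := enum_filter lines 0
  simp only [sed_snippets]
  rw [h1]
  have h2 : (idxsN lines).map (fun (k : Nat) => (0 : Int) + (k : Int))
      = (idxsN lines).map (fun (k : Nat) => (k : Int)) := by simp
  rw [h2]
  have hp := pairsA_cast (idxsN lines)
  unfold pairsA at hp
  rw [hp, foldl_cast_pairs]

theorem foldA_shift (front : List String) : ∀ (ps : List (Nat × Nat)) (rest : List String),
    foldA (ps.map (fun p => (p.1 + front.length, p.2 + front.length))) (front ++ rest)
      = front ++ foldA ps rest := by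
  intro ps
  induction ps with
  | nil => intro rest; simp [foldA]
  | cons p ps ih =>
    intro rest
    simp only [List.map_cons, foldA, List.foldl_cons] at *
    rw [List.getD_append_right _ _ _ _ (by omega),
        List.set_append_right _ _ (by omega),
        List.set_append_right _ _ (by omega)]
    simp only [Nat.add_sub_cancel]
    exact ih _

theorem gPairs_map_add (k : Nat) : ∀ (xs : List Nat),
    gPairs (xs.map (· + k)) = (gPairs xs).map (fun p => (p.1 + k, p.2 + k)) := by
  intro xs
  induction xs using gPairs.induct with
  | case1 => simp [gPairs]
  | case2 a => simp [gPairs]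
  | case3 a b t ih => simp only [List.map_cons, gPairs, ih]

theorem idxs_splitM_some : ∀ (t mid rest : List String), splitM t = (mid, some rest) →
    idxsN t = mid.length :: (idxsN rest).map (· + (mid.length + 1)) := by
  intro t
  induction t with
  | nil => intro mid rest h; simp [splitM] at h
  | cons h t ih =>
    intro mid rest hsp
    by_cases hm : markerB h
    · simp only [splitM, hm, if_pos, Prod.mk.injEq, Option.some.injEq] at hsp
      obtain ⟨rfl, rfl⟩ := hsp
      simp [idxsN, hm]
    · rw [splitM, if_neg hm] at hsp
      rw [Prod.mk.injEq] at hsp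
      obtain ⟨h1, h2⟩ := hsp
      have := ih (splitM t).1 rest (by rw [Prod.ext_iff]; exact ⟨rfl, h2⟩)
      simp only [idxsN, hm, if_neg, Bool.not_eq_true, this, List.map_cons, List.map_map, ← h1]
      rw [List.cons_eq_cons]
      refine ⟨by simp, ?_⟩
      apply List.map_congr_left
      intro k _
      simp only [Function.comp_apply, List.length_cons]
      omega

theorem idxs_splitM_none : ∀ (t : List String), (splitM t).2 = none → idxsN t = [] := by
  intro t
  induction t with
  | nil => intro _; rfl
  | cons h t ih =>
    intro hsp
    by_cases hm : markerB h
    · simp [splitM, hm] at hsp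
    · rw [splitM, if_neg hm] at hsp
      simp only [idxsN, hm, if_neg, Bool.not_eq_true, ih hsp, List.map_nil]

theorem str_close : ("}}}" ++ "\n" : String) = "}}}\n" := rfl

theorem foldA_eq_g_aux : ∀ (n : Nat) (ls : List String), ls.length ≤ n →
    foldA (gPairs (idxsN ls)) ls = g ls := by
  intro n
  induction n with
  | zero =>
    intro ls hlen
    have : ls = [] := List.eq_nil_of_length_eq_zero (by omega)
    subst this
    simp [foldA, gPairs, idxsN, g]
  | succ n ih =>
    intro ls hlen
    match ls with
    | [] => simp [foldA, gPairs, idxsN, g]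
    | h :: t =>
      by_cases hm : markerB h
      · rcases hsp : splitM t with ⟨mid, ro⟩
        cases ro with
        | none =>
          have hid : idxsN t = [] := idxs_splitM_none t (by rw [hsp])
          have hids : idxsN (h :: t) = [0] := by simp [idxsN, hm, hid]
          rw [hids, g_cons_marker_none h t hm (by rw [hsp])]
          simp [foldA, gPairs]
        | some rest =>
          obtain ⟨c, hc⟩ := splitM_shape t mid rest hsp
          have hid := idxs_splitM_some t mid rest hsp
          have hids : idxsN (h :: t) = 0 :: (mid.length + 1) ::
              (idxsN rest).map (· + (mid.length + 2)) := by
            simp only [idxsN, hm, if_pos, hid, List.map_cons, List.map_map]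
            rw [List.cons_eq_cons]
            refine ⟨rfl, ?_⟩
            rw [List.cons_eq_cons]
            refine ⟨rfl, ?_⟩
            apply List.map_congr_left
            intro k _
            simp only [Function.comp_apply]
            omega
          rw [hids]
          have hgp : gPairs (0 :: (mid.length + 1) :: (idxsN rest).map (· + (mid.length + 2)))
              = (0, mid.length + 1) ::
                (gPairs (idxsN rest)).map (fun p => (p.1 + (mid.length + 2), p.2 + (mid.length + 2))) := by
            rw [show gPairs (0 :: (mid.length + 1) :: (idxsN rest).map (· + (mid.length + 2)))
                = (0, mid.length + 1) :: gPairs ((idxsN rest).map (· + (mid.length + 2))) from rfl]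
            rw [gPairs_map_add]
          rw [hgp]
          rw [show foldA ((0, mid.length + 1) :: (gPairs (idxsN rest)).map
                (fun p => (p.1 + (mid.length + 2), p.2 + (mid.length + 2)))) (h :: t)
              = foldA ((gPairs (idxsN rest)).map
                (fun p => (p.1 + (mid.length + 2), p.2 + (mid.length + 2))))
                ((((h :: t).set 0 ("{{{" ++ drop3 ((h :: t).getD 0 ""))).set (mid.length + 1)
                  ("}}}" ++ "\n"))) from rfl]
          have hstate : (((h :: t).set 0 ("{{{" ++ drop3 ((h :: t).getD 0 ""))).set (mid.length + 1)
                  ("}}}" ++ "\n"))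
              = (("{{{" ++ drop3 h) :: mid ++ ["}}}\n"]) ++ rest := by
            subst hc
            simp only [List.getD_cons_zero, List.set_cons_zero, str_close]
            rw [List.set_cons_succ, List.set_append_right _ _ (by omega)]
            simp
          rw [hstate]
          have hfl : mid.length + 2 = (("{{{" ++ drop3 h) :: mid ++ ["}}}\n"]).length := by simp
          rw [show (fun (p : Nat × Nat) => (p.1 + (mid.length + 2), p.2 + (mid.length + 2)))
              = (fun (p : Nat × Nat) => (p.1 + (("{{{" ++ drop3 h) :: mid ++ ["}}}\n"]).length,
                  p.2 + (("{{{" ++ drop3 h) :: mid ++ ["}}}\n"]).length)) from by rw [← hfl]]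
          rw [foldA_shift]
          have hrest : rest.length ≤ n := by
            have := splitM_some_len t mid rest hsp
            simp only [List.length_cons] at hlen
            omega
          rw [ih rest hrest, g_cons_marker_some h t mid rest hm hsp]
          simp [List.append_assoc]
      · have hids : idxsN (h :: t) = (idxsN t).map (· + 1) := by simp [idxsN, hm]
        rw [hids, gPairs_map_add]
        rw [show (fun (p : Nat × Nat) => (p.1 + 1, p.2 + 1))
            = (fun (p : Nat × Nat) => (p.1 + [h].length, p.2 + [h].length)) from by simp]
        rw [show (h :: t) = [h] ++ t from rfl, foldA_shift]
        rw [ih t (by simp at hlen; omega)]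
        simp [g_cons_nomarker h t hm]

theorem foldA_eq_g : ∀ (ls : List String), foldA (gPairs (idxsN ls)) ls = g ls :=
  fun ls => foldA_eq_g_aux ls.length ls le_rfl

-- ---------- B-side reduction ----------

def flush (st : List String × Option (List String)) : List String :=
  match st.2 with
  | none => st.1
  | some buf => st.1 ++ buf

theorem loop_some : ∀ (ls buf out : List String),
    ls.foldl bStep (out, some buf) =
      (match splitM ls with
       | (mid, none) => (out, some (buf ++ mid))
       | (mid, some rest) =>
           rest.foldl bStep
             (out ++ ["{{{" ++ drop3 ((buf ++ mid).headD "")] ++ (buf ++ mid).tail ++ ["}}}\n"],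
              none)) := by
  intro ls
  induction ls with
  | nil => intro buf out; simp [splitM]
  | cons h t ih =>
    intro buf out
    by_cases hm : markerB h
    · rw [List.foldl_cons]
      rw [show bStep (out, some buf) h
          = (out ++ ["{{{" ++ drop3 (buf.headD "")] ++ buf.tail ++ ["}}}\n"], none) from by
        simp [bStep, hm]]
      rw [show splitM (h :: t) = ([], some t) from by simp [splitM, hm]]
      simp
    · rw [List.foldl_cons]
      rw [show bStep (out, some buf) h = (out, some (buf ++ [h])) from by simp [bStep, hm]]
      rw [ih (buf ++ [h]) out]
      rw [show splitM (h :: t) = (h :: (splitM t).1, (splitM t).2) from by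
        simp [splitM, hm]]
      rcases hsp : splitM t with ⟨m', ro⟩
      cases ro with
      | none => simp
      | some rest => simp

theorem loop_none_aux : ∀ (n : Nat) (ls : List String), ls.length ≤ n → ∀ (out : List String),
    flush (ls.foldl bStep (out, none)) = out ++ g ls := by
  intro n
  induction n with
  | zero =>
    intro ls hlen out
    have : ls = [] := List.eq_nil_of_length_eq_zero (by omega)
    subst this
    simp [flush, g.eq_def]
  | succ n ih =>
    intro ls hlen out
    match ls with
    | [] => simp [flush, g.eq_def]
    | h :: t =>
      by_cases hm : markerB h
      · rw [List.foldl_cons]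
        rw [show bStep (out, none) h = (out, some [h]) from by simp [bStep, hm]]
        rw [loop_some t [h] out]
        rcases hsp : splitM t with ⟨mid, ro⟩
        cases ro with
        | none =>
          have hmid : mid = t := by
            have := splitM_none_fst t (by rw [hsp])
            rw [hsp] at this; exact this
          subst hmid
          rw [g_cons_marker_none h mid hm (by rw [hsp])]
          simp [flush]
        | some rest =>
          have hrest : rest.length ≤ n := by
            have := splitM_some_len t mid rest hsp
            simp only [List.length_cons] at hlen
            omega
          rw [g_cons_marker_some h t mid rest hm hsp]
          simp only [List.singleton_append, List.headD_cons, List.tail_cons]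
          rw [ih rest hrest]
          simp [List.append_assoc]
      · rw [List.foldl_cons]
        rw [show bStep (out, none) h = (out ++ [h], none) from by simp [bStep, hm]]
        rw [ih t (by simp at hlen; omega) (out ++ [h])]
        rw [g_cons_nomarker h t hm]
        simp

theorem loop_none : ∀ (ls out : List String),
    flush (ls.foldl bStep (out, none)) = out ++ g ls :=
  fun ls => loop_none_aux ls.length ls le_rfl

theorem B_eq_g (lines : List String) : sed_snippets_alt lines = g lines := by
  have h : sed_snippets_alt lines = flush (lines.foldl bStep ([], none)) := by
    unfold sed_snippets_alt flush
    rfl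
  rw [h, loop_none lines []]
  simp

-- ===== VERDICT (by name: the statement is the Claim_ definition above) =====
theorem sed_snippets_spec : Claim_equal_sed_snippets := by
  intro lines _
  unfold Spec_sed_snippets
  rw [A_eq_foldA, foldA_eq_g, B_eq_g]
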